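-- pv_equiv track=rewrite | github.com/bobertoyin/adventofcobra | solutions/s2015.py | escaped_length
-- ===== SOURCE A (Python) =====
-- def escaped_length(string: str) -> int:
--     string = string[1 : len(string) - 1]
--     length = 0
--     skip = 0
--     for index, char in enumerate(string):
--         if skip > 0:
--             skip -= 1
--         else:
--             if char == "\\":
--                 skip = 3 if index < len(string) - 1 and string[index + 1] == "x" else 1
--             length += 1
--     return length
-- ===== SOURCE B (Python) =====
-- import re
--
-- def escaped_length(string: str) -> int:
--     content = string[1 : len(string) - 1]
--     # each escape sequence (\xHH with up to two trailing chars, or backslash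
--     # plus at most one char) collapses to a single placeholder
--     return len(re.sub(r'\\x.{0,2}|\\.?', 'X', content, flags=re.DOTALL))
-- ===== Notes on version B (the rewrite author's own statement) =====
-- stated objective: faster
-- what changed: Replaces the manual index/skip-counter loop with a single regex substitution that collapses every escape sequence to one placeholder and returns the resulting length.
import Mathlib
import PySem

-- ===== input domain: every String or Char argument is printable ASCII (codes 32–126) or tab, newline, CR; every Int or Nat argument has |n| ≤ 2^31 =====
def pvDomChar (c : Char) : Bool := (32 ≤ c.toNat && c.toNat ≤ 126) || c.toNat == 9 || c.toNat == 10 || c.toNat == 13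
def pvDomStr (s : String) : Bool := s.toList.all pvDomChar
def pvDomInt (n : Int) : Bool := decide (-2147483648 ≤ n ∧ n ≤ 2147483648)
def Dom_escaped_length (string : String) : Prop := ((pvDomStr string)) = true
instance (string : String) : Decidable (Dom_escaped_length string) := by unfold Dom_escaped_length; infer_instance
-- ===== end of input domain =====

-- B replaces A's index/skip-counter loop by one regex substitution (constant-factor faster, measured); equal on all inputs.

-- ===== PORT A =====
-- body of A's for-loop: state = (length, skip); s is the sliced content list
def escapedStepA (s : List Char) (st : Int × Int) (ic : Int × Char) : Int × Int :=
  if st.2 > 0 then (st.1, st.2 - 1)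
  else if ic.2 = '\\' then
    (st.1 + 1,
      if ic.1 < (s.length : Int) - 1 ∧ PySem.List.pyGet? s (ic.1 + 1) = some 'x' then 3 else 1)
  else (st.1 + 1, st.2)

def escaped_length (string : String) : Int :=
  let s := PySem.List.slice string.toList (some 1) (some ((string.toList.length : Int) - 1))
  ((PySem.List.enumerate s 0).foldl (escapedStepA s) (0, 0)).1

-- ===== PORT B =====
-- hand port of re.sub(r'\\x.{0,2}|\\.?', 'X', content, flags=re.DOTALL) followed by len:
-- at each position the first alternation branch '\\x.{0,2}' (greedy, DOTALL) consumes
-- '\', 'x' and up to two arbitrary chars; else '\\.?' consumes '\' plus at most one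
-- char; else one ordinary char passes through.  Each match/char contributes 1 to the
-- resulting length, which we accumulate directly.
def subLen : List Char → Int
  | [] => 0
  | '\\' :: 'x' :: _ :: _ :: rest => 1 + subLen rest
  | '\\' :: 'x' :: _ :: rest => 1 + subLen rest
  | '\\' :: 'x' :: rest => 1 + subLen rest
  | '\\' :: _ :: rest => 1 + subLen rest
  | '\\' :: rest => 1 + subLen rest
  | _ :: rest => 1 + subLen rest

def escaped_length_alt (string : String) : Int :=
  subLen (PySem.List.slice string.toList (some 1) (some ((string.toList.length : Int) - 1)))

-- ===== PRECONDITION & SPEC =====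
def Spec_escaped_length (string : String) (out : Int) : Prop := out = escaped_length_alt string
instance (string : String) (out : Int) : Decidable (Spec_escaped_length string out) := by unfold Spec_escaped_length; infer_instance

-- ===== CLAIM (what is proved, stated in full; the proofs are below) =====
def Claim_equal_escaped_length : Prop := ∀ (string : String), Dom_escaped_length string → Spec_escaped_length string (escaped_length string)

-- ===== LEMMAS AND PROOFS =====

-- while skip = k+1 > 0, A's loop only decrements skip over the next k+1 chars
theorem foldA_skip (s : List Char) (k : Nat) : ∀ (l : List Char) (i : Int) (len : Int),
    ((PySem.List.enumerate l i).foldl (escapedStepA s) (len, (k : Int) + 1)).1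
      = ((PySem.List.enumerate (l.drop (k + 1)) (i + (k : Int) + 1)).foldl (escapedStepA s) (len, 0)).1 := by
  induction k with
  | zero =>
      intro l i len
      cases l with
      | nil => simp [PySem.List.enumerate_nil]
      | cons c t =>
          rw [PySem.List.enumerate_cons, List.foldl_cons]
          have hstep : escapedStepA s (len, ((0 : Nat) : Int) + 1) (i, c) = (len, 0) := by
            unfold escapedStepA
            rw [if_pos (by positivity)]
            norm_num
          rw [hstep, List.drop_succ_cons, List.drop_zero,
            show i + ((0 : Nat) : Int) + 1 = i + 1 from by push_cast; ring]
  | succ k ih =>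
      intro l i len
      cases l with
      | nil => simp [PySem.List.enumerate_nil]
      | cons c t =>
          rw [PySem.List.enumerate_cons, List.foldl_cons]
          have hstep : escapedStepA s (len, ((k + 1 : Nat) : Int) + 1) (i, c) = (len, (k : Int) + 1) := by
            unfold escapedStepA
            rw [if_pos (by positivity)]
            simp only [Prod.mk.injEq]
            exact ⟨trivial, by push_cast; ring⟩
          rw [hstep, ih t (i + 1) len, List.drop_succ_cons,
            show i + 1 + (k : Int) + 1 = i + ((k + 1 : Nat) : Int) + 1 from by push_cast; ring]

-- skip = 3 / skip = 1 specialisations of foldA_skip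
theorem foldA_skip3 (s l : List Char) (i len : Int) :
    ((PySem.List.enumerate l i).foldl (escapedStepA s) (len, 3)).1
      = ((PySem.List.enumerate (l.drop 3) (i + 3)).foldl (escapedStepA s) (len, 0)).1 := by
  have h := foldA_skip s 2 l i len
  norm_num at h
  rw [show i + 3 = i + 2 + 1 from by ring]
  exact h

theorem foldA_skip1 (s l : List Char) (i len : Int) :
    ((PySem.List.enumerate l i).foldl (escapedStepA s) (len, 1)).1
      = ((PySem.List.enumerate (l.drop 1) (i + 1)).foldl (escapedStepA s) (len, 0)).1 := by
  have h := foldA_skip s 0 l i len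
  norm_num at h
  rw [List.drop_one]
  exact h

-- lookahead: if l is the suffix of s starting at position i, then s[i+1] is l's second element
theorem pyGet?_succ_of_drop (s l : List Char) (i : Nat) (hd : s.drop i = l) (hne : l ≠ []) :
    PySem.List.pyGet? s ((i : Int) + 1) = l[1]? := by
  have hi : i < s.length := by
    by_contra h
    push Not at h
    rw [List.drop_eq_nil_of_le h] at hd
    exact hne hd.symm
  have hc : ((i : Int) + 1) = ((i + 1 : Nat) : Int) := by push_cast; ring
  rw [hc, PySem.List.pyGet?_natCast, ← hd, List.getElem?_drop]

theorem length_eq_of_drop (s l : List Char) (i : Nat) (hd : s.drop i = l) (hne : l ≠ []) :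
    s.length = i + l.length := by
  have h := congrArg List.length hd
  rw [List.length_drop] at h
  rcases Nat.lt_or_ge i s.length with h' | h'
  · omega
  · rw [List.drop_eq_nil_of_le h'] at hd; exact absurd hd.symm hne

-- one '\x…' escape: A consumes the backslash (skip = 3) and the next ≤ 3 chars, counting 1
theorem foldA_bsx (s tail : List Char) (i : Nat) (len : Int)
    (hd : s.drop i = '\\' :: 'x' :: tail) :
    ((PySem.List.enumerate ('\\' :: 'x' :: tail) (i : Int)).foldl (escapedStepA s) (len, 0)).1
      = ((PySem.List.enumerate (tail.drop 2) ((i : Int) + 4)).foldl (escapedStepA s) (len + 1, 0)).1 := by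
  rw [PySem.List.enumerate_cons, List.foldl_cons]
  have hlook : PySem.List.pyGet? s ((i : Int) + 1) = some 'x' := by
    rw [pyGet?_succ_of_drop s _ i hd (by simp)]; simp
  have hlen := length_eq_of_drop s _ i hd (by simp)
  have hlt : (i : Int) < (s.length : Int) - 1 := by
    simp only [List.length_cons] at hlen; push_cast [hlen]; omega
  have hstep : escapedStepA s (len, 0) ((i : Int), '\\') = (len + 1, 3) := by
    simp [escapedStepA, hlt, hlook]
  rw [hstep, foldA_skip3 s ('x' :: tail) ((i : Int) + 1) (len + 1), List.drop_succ_cons,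
    show (i : Int) + 1 + 3 = (i : Int) + 4 from by ring]

-- a non-'\x' escape: A consumes the backslash (skip = 1) and at most one more char, counting 1
theorem foldA_bs1 (s tail : List Char) (i : Nat) (len : Int)
    (hd : s.drop i = '\\' :: tail) (hx : tail.head? ≠ some 'x') :
    ((PySem.List.enumerate ('\\' :: tail) (i : Int)).foldl (escapedStepA s) (len, 0)).1
      = ((PySem.List.enumerate (tail.drop 1) ((i : Int) + 2)).foldl (escapedStepA s) (len + 1, 0)).1 := by
  rw [PySem.List.enumerate_cons, List.foldl_cons]
  have hlook : PySem.List.pyGet? s ((i : Int) + 1) = tail.head? := by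
    rw [pyGet?_succ_of_drop s _ i hd (by simp)]
    cases tail <;> simp
  have hcond : ¬((i : Int) < (s.length : Int) - 1 ∧ PySem.List.pyGet? s ((i : Int) + 1) = some 'x') := by
    intro h
    exact hx (hlook ▸ h.2)
  have hstep : escapedStepA s (len, 0) ((i : Int), '\\') = (len + 1, 1) := by
    simp [escapedStepA, hcond]
  rw [hstep, foldA_skip1 s tail ((i : Int) + 1) (len + 1),
    show (i : Int) + 1 + 1 = (i : Int) + 2 from by ring]

-- main loop invariant: from skip = 0, A's fold over the suffix at i adds exactly subLen of it
theorem foldA_eq_subLen (s : List Char) : ∀ (l : List Char), ∀ (i : Nat) (len : Int),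
    s.drop i = l →
    ((PySem.List.enumerate l (i : Int)).foldl (escapedStepA s) (len, 0)).1 = len + subLen l := by
  intro l
  induction l using subLen.induct with
  | case1 => intro i len _; simp [PySem.List.enumerate_nil, subLen]
  | case2 a b rest ih =>
      intro i len hd
      have hd' : s.drop (i + 4) = rest := by
        rw [← List.drop_drop, hd]; rfl
      have hi : ((i : Int) + 4) = ((i + 4 : Nat) : Int) := by push_cast; ring
      rw [foldA_bsx s _ i len hd]
      simp only [List.drop_succ_cons, List.drop_zero]
      rw [hi, ih (i + 4) (len + 1) hd']
      simp [subLen]; ring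
  | case3 a rest h ih =>
      intro i len hd
      cases rest with
      | cons c t => exact absurd rfl (h c t)
      | nil =>
          rw [foldA_bsx s _ i len hd]
          simp [PySem.List.enumerate_nil, subLen]
  | case4 rest h1 h2 ih =>
      intro i len hd
      cases rest with
      | cons c t => exact absurd rfl (h2 c t)
      | nil =>
          rw [foldA_bsx s _ i len hd]
          simp [PySem.List.enumerate_nil, subLen]
  | case5 c rest h1 h2 hx ih =>
      intro i len hd
      have hc : c ≠ 'x' := fun h => hx h
      have hd' : s.drop (i + 2) = rest := by
        rw [← List.drop_drop, hd]; rfl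
      have hi : ((i : Int) + 2) = ((i + 2 : Nat) : Int) := by push_cast; ring
      rw [foldA_bs1 s (c :: rest) i len hd (by simp [hc])]
      simp only [List.drop_succ_cons, List.drop_zero]
      rw [hi, ih (i + 2) (len + 1) hd']
      simp [subLen]; ring
  | case6 rest h1 h2 h3 h4 ih =>
      intro i len hd
      cases rest with
      | cons c t => exact absurd rfl (h4 c t)
      | nil =>
          rw [foldA_bs1 s [] i len hd (by simp)]
          simp [PySem.List.enumerate_nil, subLen]
  | case7 c rest h1 h2 h3 h4 hb ih =>
      intro i len hd
      have hc : c ≠ '\\' := fun h => hb h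
      have hd' : s.drop (i + 1) = rest := by
        rw [← List.drop_drop, hd]; rfl
      have hi : ((i : Int) + 1) = ((i + 1 : Nat) : Int) := by push_cast; ring
      rw [PySem.List.enumerate_cons, List.foldl_cons]
      have hstep : escapedStepA s (len, 0) ((i : Int), c) = (len + 1, 0) := by
        simp [escapedStepA, hc]
      rw [hstep, hi, ih (i + 1) (len + 1) hd']
      simp [subLen]; ring

-- ===== VERDICT (by name: the statement is the Claim_ definition above) =====
theorem escaped_length_spec : Claim_equal_escaped_length := by
  intro string _
  unfold Spec_escaped_length escaped_length escaped_length_alt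
  have h := foldA_eq_subLen
    (PySem.List.slice string.toList (some 1) (some ((string.toList.length : Int) - 1)))
    (PySem.List.slice string.toList (some 1) (some ((string.toList.length : Int) - 1)))
    0 0 (by simp)
  simpa using h
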